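-- pv_equiv track=rewrite | github.com/suspectpart/id3vx | src/id3vx/binary.py | unsynchsafe
-- ===== SOURCE A (Python) =====
-- def unsynchsafe(integer):
--     out = 0
--     mask = 0x7F000000
--
--     while mask:
--         out >>= 1
--         out |= integer & mask
--         mask >>= 8
--
--     return out
-- ===== SOURCE B (Python) =====
-- def unsynchsafe(integer):
--     return (
--         (integer & 0x7F)
--         | ((integer >> 8) & 0x7F) << 7
--         | ((integer >> 16) & 0x7F) << 14
--         | ((integer >> 24) & 0x7F) << 21
--     )
-- ===== Notes on version B (the rewrite author's own statement) =====
-- stated objective: simpler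
-- what changed: replaced the progressive shift-and-mask while-loop over a shrinking mask by a single closed-form expression that extracts the four 7-bit groups and packs them with shifts and ORs
import Mathlib
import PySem

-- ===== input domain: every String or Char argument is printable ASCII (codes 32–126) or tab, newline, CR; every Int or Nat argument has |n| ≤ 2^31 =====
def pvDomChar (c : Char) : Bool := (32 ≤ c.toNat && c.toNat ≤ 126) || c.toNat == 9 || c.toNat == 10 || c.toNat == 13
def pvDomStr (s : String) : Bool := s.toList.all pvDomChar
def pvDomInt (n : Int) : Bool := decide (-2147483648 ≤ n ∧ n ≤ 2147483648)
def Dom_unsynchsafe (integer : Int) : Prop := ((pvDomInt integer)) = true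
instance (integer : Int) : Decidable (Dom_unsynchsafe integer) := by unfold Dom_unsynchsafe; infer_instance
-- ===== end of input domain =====

-- B replaces A's progressive shift-and-mask loop by one closed-form expression extracting the four 7-bit groups (objective: simpler).

-- ===== PORT A =====
-- the 'while mask:' loop; mask is a nonnegative Python int, kept as a Nat and cast where A computes 'integer & mask'
def unsynchsafeLoop (integer out : Int) (mask : Nat) : Int :=
  if mask = 0 then out
  else unsynchsafeLoop integer (PySem.Int.bor (out >>> (1 : ℕ)) (PySem.Int.band integer (mask : Int))) (mask >>> 8)
termination_by mask
decreasing_by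
  simp only [Nat.shiftRight_eq_div_pow]
  exact Nat.div_lt_self (Nat.pos_of_ne_zero (by assumption)) (by norm_num)

def unsynchsafe (integer : Int) : Int := unsynchsafeLoop integer 0 0x7F000000

-- ===== PORT B =====
def unsynchsafe_alt (integer : Int) : Int :=
  PySem.Int.bor (PySem.Int.bor (PySem.Int.bor
    (PySem.Int.band integer 0x7F)
    ((PySem.Int.band (integer >>> (8 : ℕ)) 0x7F) <<< (7 : ℕ)))
    ((PySem.Int.band (integer >>> (16 : ℕ)) 0x7F) <<< (14 : ℕ)))
    ((PySem.Int.band (integer >>> (24 : ℕ)) 0x7F) <<< (21 : ℕ))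

-- ===== PRECONDITION & SPEC =====
def Spec_unsynchsafe (integer : Int) (out : Int) : Prop := out = unsynchsafe_alt integer
instance (integer : Int) (out : Int) : Decidable (Spec_unsynchsafe integer out) := by unfold Spec_unsynchsafe; infer_instance

-- ===== CLAIM (what is proved, stated in full; the proofs are below) =====
def Claim_equal_unsynchsafe : Prop := ∀ (integer : Int), Dom_unsynchsafe integer → Spec_unsynchsafe integer (unsynchsafe integer)

-- ===== LEMMAS AND PROOFS =====

-- Nat mask extraction: n &&& (127·2^m) pulls the 7-bit field at offset m
theorem pv_nat_mask (n m : ℕ) : n &&& (127 * 2 ^ m) = (n / 2 ^ m % 128) * 2 ^ m := by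
  apply Nat.eq_of_testBit_eq
  intro j
  rw [show 127 * 2 ^ m = 127 <<< m by rw [Nat.shiftLeft_eq],
      show (n / 2 ^ m % 128) * 2 ^ m = ((n >>> m) % 2 ^ 7) <<< m by
        rw [Nat.shiftLeft_eq, Nat.shiftRight_eq_div_pow]; norm_num]
  rw [Nat.testBit_and, Nat.testBit_shiftLeft, Nat.testBit_shiftLeft,
      Nat.testBit_mod_two_pow, Nat.testBit_shiftRight,
      show (127 : ℕ) = 2 ^ 7 - 1 by norm_num, Nat.testBit_two_pow_sub_one]
  by_cases hm : m ≤ j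
  · have hj : m + (j - m) = j := by omega
    simp [hm, hj, Bool.and_comm]
  · simp [hm]

-- floor division of -(n+1) by a positive d
theorem pv_neg_ediv (n d : ℕ) (hd : 0 < d) :
    (-(n : Int) - 1) / (d : Int) = -((n / d : ℕ) : Int) - 1 := by
  have hnd : (d : Int) * ((n / d : ℕ) : Int) + ((n % d : ℕ) : Int) = (n : Int) := by
    exact_mod_cast Nat.div_add_mod n d
  have hmod : ((n % d : ℕ) : Int) < (d : Int) := by exact_mod_cast Nat.mod_lt n hd
  have hmod0 : (0 : Int) ≤ ((n % d : ℕ) : Int) := by positivity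
  have hD : (0 : Int) < (d : Int) := by exact_mod_cast hd
  have key : (-(n : Int) - 1)
      = ((d : Int) - 1 - ((n % d : ℕ) : Int)) + (d : Int) * (-((n / d : ℕ) : Int) - 1) := by
    have expand : (d : Int) * (-((n / d : ℕ) : Int) - 1)
        = -((d : Int) * ((n / d : ℕ) : Int)) - (d : Int) := by ring
    rw [expand]; linarith
  rw [key, Int.add_mul_ediv_left _ _ (ne_of_gt hD),
      Int.ediv_eq_zero_of_lt (by linarith) (by linarith), zero_add]

-- Int mask extraction, Python two's-complement semantics, any sign
theorem pv_int_mask (i : Int) (m : ℕ) :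
    PySem.Int.band i (127 * 2 ^ m) = i / 2 ^ m % 128 * 2 ^ m := by
  have hcastM : ((127 * 2 ^ m : ℕ) : Int) = 127 * 2 ^ m := by push_cast; ring
  have hM : (0 : Int) ≤ 127 * 2 ^ m := by positivity
  have hpow : ((2 ^ m : ℕ) : Int) = 2 ^ m := by push_cast; ring
  by_cases hi : 0 ≤ i
  · rw [PySem.Int.band_of_nonneg hi hM]
    have h1 : (127 * 2 ^ m : Int).toNat = 127 * 2 ^ m := by
      rw [← hcastM, Int.toNat_natCast]
    rw [h1, pv_nat_mask]
    have h2 : i = (i.toNat : Int) := (Int.toNat_of_nonneg hi).symm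
    rw [h2]
    push_cast [Int.natCast_div, Int.natCast_mod]
    norm_num
  · have hne : ¬ (0 ≤ i) := hi
    have hi' : i < 0 := by omega
    rw [PySem.Int.band]
    simp only [hne, if_false, hM, if_true]
    set n : ℕ := (-i - 1).toNat with hn
    have hin : i = -(n : Int) - 1 := by
      have h3 : ((-i - 1).toNat : Int) = -i - 1 := Int.toNat_of_nonneg (by omega)
      omega
    have hMn : (127 * 2 ^ m : Int).toNat = 127 * 2 ^ m := by
      rw [← hcastM, Int.toNat_natCast]
    rw [hMn, Nat.and_comm, pv_nat_mask]
    set q : ℕ := n / 2 ^ m with hq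
    have hdiv : i / 2 ^ m = -(q : Int) - 1 := by
      rw [hin, ← hpow, pv_neg_ediv n (2 ^ m) (by positivity)]
    have hmod : (-(q : Int) - 1) % 128 = 127 - ((q % 128 : ℕ) : Int) := by
      omega
    have hle : q % 128 * 2 ^ m ≤ 127 * 2 ^ m :=
      Nat.mul_le_mul_right _ (by omega)
    rw [hdiv, hmod]
    push_cast [Nat.cast_sub hle]
    ring

-- disjoint OR on Nat: low part below 2^t, high part a multiple of 2^t
theorem pv_nat_or_add (t x y : ℕ) (hx : x < 2 ^ t) (hy : 2 ^ t ∣ y) : x ||| y = x + y := by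
  induction t generalizing x y with
  | zero =>
    have hx0 : x = 0 := by omega
    subst hx0
    simp
  | succ t ih =>
    obtain ⟨c, hc⟩ := hy
    have h2 : 2 ∣ y := ⟨2 ^ t * c, by rw [hc, pow_succ]; ring⟩
    have hxb : Nat.bit (x.testBit 0) (x >>> 1) = x := Nat.bit_testBit_zero_shiftRight_one x
    have hyb : Nat.bit false (y >>> 1) = y := by
      rw [Nat.bit_val, Nat.shiftRight_one]
      simp only [Bool.toNat_false]
      omega
    have hx' : x >>> 1 < 2 ^ t := by
      rw [Nat.shiftRight_one]
      have := Nat.pow_succ 2 t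
      omega
    have hy' : 2 ^ t ∣ y >>> 1 := by
      refine ⟨c, ?_⟩
      rw [Nat.shiftRight_one, hc, pow_succ]
      rw [Nat.mul_comm (2 ^ t) 2, Nat.mul_assoc, Nat.mul_div_cancel_left _ (by norm_num)]
    calc x ||| y = Nat.bit (x.testBit 0) (x >>> 1) ||| Nat.bit false (y >>> 1) := by
          rw [hxb, hyb]
      _ = Nat.bit (x.testBit 0 || false) ((x >>> 1) ||| (y >>> 1)) := Nat.lor_bit _ _ _ _
      _ = Nat.bit (x.testBit 0) ((x >>> 1) + (y >>> 1)) := by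
          rw [Bool.or_false, ih _ _ hx' hy']
      _ = x + y := by
          rw [Nat.bit_val]
          rw [Nat.bit_val] at hxb
          rw [Nat.shiftRight_one] at hxb ⊢
          omega

-- disjoint OR is addition on Int: low part below 2^t, high part a multiple of 2^t
theorem pv_bor_add (a b : Int) (t : ℕ) (ha : 0 ≤ a) (hb : 0 ≤ b)
    (ha' : a < 2 ^ t) (hb' : ((2 : Int) ^ t) ∣ b) : PySem.Int.bor a b = a + b := by
  rw [PySem.Int.bor_of_nonneg ha hb]
  have hxa : a.toNat < 2 ^ t := by
    have h1 : (a.toNat : Int) < (2 : Int) ^ t := by rw [Int.toNat_of_nonneg ha]; exact ha'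
    exact_mod_cast h1
  have hxb : (2 ^ t : ℕ) ∣ b.toNat := by
    obtain ⟨c, hc⟩ := hb'
    have hc0 : 0 ≤ c := by
      by_contra h
      push_neg at h
      nlinarith [pow_pos (show (0 : Int) < 2 by norm_num) t]
    refine ⟨c.toNat, ?_⟩
    have hcast : (b.toNat : Int) = ((2 ^ t * c.toNat : ℕ) : Int) := by
      push_cast
      rw [Int.toNat_of_nonneg hb, Int.toNat_of_nonneg hc0, hc]
    exact_mod_cast hcast
  rw [pv_nat_or_add t a.toNat b.toNat hxa hxb]
  push_cast
  rw [Int.toNat_of_nonneg ha, Int.toNat_of_nonneg hb]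

-- ===== VERDICT (by name: the statement is the Claim_ definition above) =====
set_option maxHeartbeats 1000000 in
theorem unsynchsafe_spec : Claim_equal_unsynchsafe := by
  intro i _
  show unsynchsafe i = unsynchsafe_alt i
  -- extraction equations for the four masks, any-sign i
  have e0 : ∀ j : Int, PySem.Int.band j 127 = j % 128 := by
    intro j; have h := pv_int_mask j 0; norm_num at h; exact h
  have e8 : PySem.Int.band i 32512 = i / 256 % 128 * 256 := by
    have h := pv_int_mask i 8; norm_num at h; exact h
  have e16 : PySem.Int.band i 8323072 = i / 65536 % 128 * 65536 := by
    have h := pv_int_mask i 16; norm_num at h; exact h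
  have e24 : PySem.Int.band i 2130706432 = i / 16777216 % 128 * 16777216 := by
    have h := pv_int_mask i 24; norm_num at h; exact h
  -- digit bounds
  have b0 : 0 ≤ i % 128 ∧ i % 128 < 128 :=
    ⟨Int.emod_nonneg i (by norm_num), Int.emod_lt_of_pos i (by norm_num)⟩
  have b1 : 0 ≤ i / 256 % 128 ∧ i / 256 % 128 < 128 :=
    ⟨Int.emod_nonneg _ (by norm_num), Int.emod_lt_of_pos _ (by norm_num)⟩
  have b2 : 0 ≤ i / 65536 % 128 ∧ i / 65536 % 128 < 128 :=
    ⟨Int.emod_nonneg _ (by norm_num), Int.emod_lt_of_pos _ (by norm_num)⟩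
  have b3 : 0 ≤ i / 16777216 % 128 ∧ i / 16777216 % 128 < 128 :=
    ⟨Int.emod_nonneg _ (by norm_num), Int.emod_lt_of_pos _ (by norm_num)⟩
  set x0 := i % 128 with hx0
  set x1 := i / 256 % 128 with hx1
  set x2 := i / 65536 % 128 with hx2
  set x3 := i / 16777216 % 128 with hx3
  -- unfold A's four loop iterations, one mask at a time
  have L1 : ∀ o : Int, unsynchsafeLoop i o 2130706432
      = unsynchsafeLoop i (PySem.Int.bor (o >>> (1 : ℕ)) (x3 * 16777216)) 8323072 := by
    intro o
    rw [unsynchsafeLoop]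
    norm_num [Nat.shiftRight_eq_div_pow, e24]
  have L2 : ∀ o : Int, unsynchsafeLoop i o 8323072
      = unsynchsafeLoop i (PySem.Int.bor (o >>> (1 : ℕ)) (x2 * 65536)) 32512 := by
    intro o
    rw [unsynchsafeLoop]
    norm_num [Nat.shiftRight_eq_div_pow, e16]
  have L3 : ∀ o : Int, unsynchsafeLoop i o 32512
      = unsynchsafeLoop i (PySem.Int.bor (o >>> (1 : ℕ)) (x1 * 256)) 127 := by
    intro o
    rw [unsynchsafeLoop]
    norm_num [Nat.shiftRight_eq_div_pow, e8]
  have L4 : ∀ o : Int, unsynchsafeLoop i o 127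
      = PySem.Int.bor (o >>> (1 : ℕ)) x0 := by
    intro o
    rw [unsynchsafeLoop, unsynchsafeLoop]
    norm_num [Nat.shiftRight_eq_div_pow, e0, hx0]
  rw [unsynchsafe, L1, L2, L3, L4]
  have z2 : PySem.Int.bor ((0 : Int) >>> (1 : ℕ)) (x3 * 16777216) = x3 * 16777216 := by
    rw [show ((0 : Int) >>> (1 : ℕ)) = 0 by rw [Int.shiftRight_eq_div_pow]; norm_num,
        PySem.Int.bor_comm, PySem.Int.bor_zero]
  rw [z2]
  have s1 : (x3 * 16777216) >>> (1 : ℕ) = x3 * 8388608 := by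
    rw [Int.shiftRight_eq_div_pow]; omega
  rw [s1]
  have a2 : PySem.Int.bor (x3 * 8388608) (x2 * 65536) = x2 * 65536 + x3 * 8388608 := by
    rw [PySem.Int.bor_comm]
    exact pv_bor_add (x2 * 65536) (x3 * 8388608) 23
      (by omega) (by omega) (by omega) ⟨x3, by ring⟩
  rw [a2]
  have s2 : (x2 * 65536 + x3 * 8388608) >>> (1 : ℕ) = x3 * 4194304 + x2 * 32768 := by
    rw [Int.shiftRight_eq_div_pow]; omega
  rw [s2]
  have a3 : PySem.Int.bor (x3 * 4194304 + x2 * 32768) (x1 * 256)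
      = x1 * 256 + (x3 * 4194304 + x2 * 32768) := by
    rw [PySem.Int.bor_comm]
    exact pv_bor_add (x1 * 256) (x3 * 4194304 + x2 * 32768) 15
      (by omega) (by omega)
      (by omega) ⟨x3 * 128 + x2, by ring⟩
  rw [a3]
  have s3 : (x1 * 256 + (x3 * 4194304 + x2 * 32768)) >>> (1 : ℕ)
      = x3 * 2097152 + x2 * 16384 + x1 * 128 := by
    rw [Int.shiftRight_eq_div_pow]; omega
  rw [s3]
  have a4 : PySem.Int.bor (x3 * 2097152 + x2 * 16384 + x1 * 128) x0
      = x0 + (x3 * 2097152 + x2 * 16384 + x1 * 128) := by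
    rw [PySem.Int.bor_comm]
    exact pv_bor_add x0 (x3 * 2097152 + x2 * 16384 + x1 * 128) 7
      b0.1 (by omega) b0.2 ⟨x3 * 16384 + x2 * 128 + x1, by ring⟩
  rw [a4]
  -- now B's side
  rw [unsynchsafe_alt]
  have t8 : i >>> (8 : ℕ) = i / 256 := by rw [Int.shiftRight_eq_div_pow]; norm_num
  have t16 : i >>> (16 : ℕ) = i / 65536 := by rw [Int.shiftRight_eq_div_pow]; norm_num
  have t24 : i >>> (24 : ℕ) = i / 16777216 := by rw [Int.shiftRight_eq_div_pow]; norm_num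
  rw [t8, t16, t24, e0, e0, e0, e0, ← hx0, ← hx1, ← hx2, ← hx3]
  have l7 : x1 <<< (7 : ℕ) = x1 * 128 := by rw [Int.shiftLeft_eq]; norm_num
  have l14 : x2 <<< (14 : ℕ) = x2 * 16384 := by rw [Int.shiftLeft_eq]; norm_num
  have l21 : x3 <<< (21 : ℕ) = x3 * 2097152 := by rw [Int.shiftLeft_eq]; norm_num
  rw [l7, l14, l21]
  rw [pv_bor_add x0 (x1 * 128) 7 b0.1 (by omega) b0.2 ⟨x1, by ring⟩]
  rw [pv_bor_add (x0 + x1 * 128) (x2 * 16384) 14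
        (by omega) (by omega)
        (by omega) ⟨x2, by ring⟩]
  rw [pv_bor_add (x0 + x1 * 128 + x2 * 16384) (x3 * 2097152) 21
        (by omega) (by omega)
        (by omega) ⟨x3, by ring⟩]
  ring
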